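-- pv_equiv track=rewrite | github.com/fiduswriter/fiduswriter | bibliography/migrations/0006_auto_20161122_0304.py | reform_f_date
-- ===== SOURCE A (Python) =====
-- def reform_f_date(date_string):
--     date_string = date_string.replace('-AA','').replace('A','u')
--     ref_date_strings = []
--     for date in date_string.split('/'):
--         date_parts = date.split('-')
--         year = "0000" + date_parts[0]
--         ref_date_string = year[-4:]
--         if len(date_parts) > 1:
--             month = "0" + date_parts[1]
--             ref_date_string += '-' + month[-2:]
--         if len(date_parts) > 2:
--             day = "0" + date_parts[2]
--             ref_date_string += '-' + day[-2:]
--         ref_date_strings.append(ref_date_string)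
--     return '/'.join(ref_date_strings)
-- ===== SOURCE B (Python) =====
-- def _emit(part, idx):
--     if idx == 0:
--         return ("0000" + part)[-4:]
--     if idx <= 2:
--         return "-" + ("0" + part)[-2:]
--     return ""
--
--
-- def reform_f_date(date_string):
--     s = date_string.replace('-AA', '').replace('A', 'u')
--     res = ""
--     buf = ""
--     idx = 0
--     for ch in s:
--         if ch == '/':
--             res += _emit(buf, idx) + '/'
--             buf = ""
--             idx = 0
--         elif ch == '-':
--             res += _emit(buf, idx)
--             buf = ""
--             idx += 1
--         else:
--             buf += ch
--     return res + _emit(buf, idx)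
-- ===== Notes on version B (the rewrite author's own statement) =====
-- stated objective: alternative
-- what changed: Replaces A's two-level split ('/' then '-') with per-part padding branches by a single character-level state machine pass that emits each padded part at the separator it meets, never building intermediate part lists.
import Mathlib
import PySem

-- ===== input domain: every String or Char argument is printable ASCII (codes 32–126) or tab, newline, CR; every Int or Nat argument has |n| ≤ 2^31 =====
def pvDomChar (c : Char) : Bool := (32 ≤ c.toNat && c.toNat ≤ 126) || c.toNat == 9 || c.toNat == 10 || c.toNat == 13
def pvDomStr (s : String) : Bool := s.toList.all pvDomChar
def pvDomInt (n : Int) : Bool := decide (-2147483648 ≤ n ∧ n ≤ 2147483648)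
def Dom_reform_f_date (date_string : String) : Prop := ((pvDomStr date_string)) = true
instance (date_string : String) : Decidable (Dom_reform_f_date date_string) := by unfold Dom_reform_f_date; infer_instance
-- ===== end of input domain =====

-- B replaces A's two-level split ('/' then '-') by a single character-level state-machine
-- pass that emits each padded part at the separator it meets; objective: alternative.

-- ===== PORT A =====
-- one iteration of A's for-loop body: split on '-', pad year, then the two unrolled ifs
def pvSegA (date : List Char) : List Char :=
  let parts := PySem.Chars.splitOn date ['-']
  let year := "0000".toList ++ PySem.List.pyGetD parts 0 []
  let r1 := PySem.List.slice year (some (-4)) none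
  let r2 :=
    if parts.length > 1 then
      r1 ++ ['-'] ++ PySem.List.slice ('0' :: PySem.List.pyGetD parts 1 []) (some (-2)) none
    else r1
  if parts.length > 2 then
    r2 ++ ['-'] ++ PySem.List.slice ('0' :: PySem.List.pyGetD parts 2 []) (some (-2)) none
  else r2

def reform_f_date (date_string : String) : String :=
  let s := PySem.Chars.replace (PySem.Chars.replace date_string.toList "-AA".toList []) ['A'] ['u']
  let refs := (PySem.Chars.splitOn s ['/']).foldl (fun acc date => acc ++ [pvSegA date]) []
  String.ofList (PySem.Chars.join ['/'] refs)

-- ===== PORT B =====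
-- Source B's _emit(part, idx)
def pvEmit (part : List Char) (idx : Nat) : List Char :=
  if idx = 0 then PySem.List.slice ("0000".toList ++ part) (some (-4)) none
  else if idx ≤ 2 then '-' :: PySem.List.slice ('0' :: part) (some (-2)) none
  else []

-- one step of Source B's for-loop over the characters; state = (res, buf, idx)
def pvStep : (List Char × List Char × Nat) → Char → (List Char × List Char × Nat)
  | (res, buf, idx), ch =>
    if ch = '/' then (res ++ pvEmit buf idx ++ ['/'], [], 0)
    else if ch = '-' then (res ++ pvEmit buf idx, [], idx + 1)
    else (res, buf ++ [ch], idx)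

def reform_f_date_alt (date_string : String) : String :=
  let s := PySem.Chars.replace (PySem.Chars.replace date_string.toList "-AA".toList []) ['A'] ['u']
  let st := s.foldl pvStep ([], [], 0)
  String.ofList (st.1 ++ pvEmit st.2.1 st.2.2)

-- ===== PRECONDITION & SPEC =====
def Spec_reform_f_date (date_string : String) (out : String) : Prop := out = reform_f_date_alt date_string
instance (date_string : String) (out : String) : Decidable (Spec_reform_f_date date_string out) := by unfold Spec_reform_f_date; infer_instance

-- ===== CLAIM (what is proved, stated in full; the proofs are below) =====
def Claim_equal_reform_f_date : Prop := ∀ (date_string : String), Dom_reform_f_date date_string → Spec_reform_f_date date_string (reform_f_date date_string)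

-- ===== LEMMAS AND PROOFS =====

-- split a char list at every occurrence of c, with accumulated prefix pre of the first part
def pvSplitC (c : Char) : List Char → List Char → List (List Char)
  | [], pre => [pre]
  | x :: l, pre => if x = c then pre :: pvSplitC c l [] else pvSplitC c l (pre ++ [x])

-- functional description of B's loop: output of the remaining input given (buf, idx)
def pvG : List Char → List Char → Nat → List Char
  | [], buf, idx => pvEmit buf idx
  | ch :: l, buf, idx =>
    if ch = '/' then pvEmit buf idx ++ '/' :: pvG l [] 0
    else if ch = '-' then pvEmit buf idx ++ pvG l [] (idx + 1)
    else pvG l (buf ++ [ch]) idx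

def pvEmitParts : List (List Char) → Nat → List Char
  | [], _ => []
  | p :: ps, idx => pvEmit p idx ++ pvEmitParts ps (idx + 1)

def pvSegOut (seg : List Char) : List Char := pvEmitParts (pvSplitC '-' seg []) 0

def pvJoinRest : List (List Char) → List Char
  | [] => []
  | seg :: rest => '/' :: (pvSegOut seg ++ pvJoinRest rest)

def pvH : List (List Char) → List Char → Nat → List Char
  | [], _, _ => []
  | seg :: rest, buf, idx => pvEmitParts (pvSplitC '-' seg buf) idx ++ pvJoinRest rest

lemma pvSplitC_ne_nil (c : Char) (l pre : List Char) : pvSplitC c l pre ≠ [] := by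
  induction l generalizing pre with
  | nil => simp [pvSplitC]
  | cons x l ih =>
    simp only [pvSplitC]
    split
    · simp
    · exact ih _

lemma pvSplitC_pre (c : Char) (l : List Char) :
    ∀ pre, pvSplitC c l pre = (pvSplitC c l []).modifyHead (pre ++ ·) := by
  induction l with
  | nil => intro pre; simp [pvSplitC]
  | cons x l ih =>
    intro pre
    by_cases hx : x = c
    · simp [pvSplitC, hx]
    · simp only [pvSplitC, if_neg hx, List.nil_append]
      rw [ih (pre ++ [x]), ih [x]]
      cases h : pvSplitC c l [] with
      | nil => exact absurd h (pvSplitC_ne_nil c l [])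
      | cons t r => simp

lemma pvSplitOn_go_single (c : Char) :
    ∀ (fuel : Nat) (l cur : List Char) (acc : List (List Char)), l.length < fuel →
      PySem.Chars.splitOn.go [c] fuel l cur acc = acc.reverse ++ pvSplitC c l cur.reverse := by
  intro fuel
  induction fuel with
  | zero => intro l cur acc h; omega
  | succ n ih =>
    intro l cur acc h
    cases l with
    | nil => simp [PySem.Chars.splitOn.go, pvSplitC]
    | cons x rest =>
      rw [PySem.Chars.splitOn.go]
      have hlen : rest.length < n := by simpa using h
      by_cases hx : x = c
      · have hpre : List.isPrefixOf [c] (x :: rest) = true := by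
          simp [List.isPrefixOf, hx]
        simp only [hpre, if_true, List.length_cons, List.length_nil, List.drop_succ_cons,
          List.drop_zero]
        rw [ih rest [] (cur.reverse :: acc) hlen]
        simp [pvSplitC, hx]
      · have hpre : List.isPrefixOf [c] (x :: rest) = false := by
          simp [List.isPrefixOf]
          intro h'; exact absurd h'.symm hx
        simp only [hpre, Bool.false_eq_true, if_false]
        rw [ih rest (x :: cur) acc hlen]
        simp [pvSplitC, hx]

lemma pvSplitOn_single (c : Char) (l : List Char) :
    PySem.Chars.splitOn l [c] = pvSplitC c l [] := by
  unfold PySem.Chars.splitOn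
  rw [pvSplitOn_go_single c (l.length + 1) l [] [] (by omega)]
  simp

-- B's fold equals pvG
lemma pvFold_eq_G (l : List Char) :
    ∀ res buf idx,
      (let st := l.foldl pvStep (res, buf, idx); st.1 ++ pvEmit st.2.1 st.2.2) =
        res ++ pvG l buf idx := by
  induction l with
  | nil => intro res buf idx; simp [pvG]
  | cons ch l ih =>
    intro res buf idx
    simp only [List.foldl_cons, pvStep, pvG]
    by_cases h1 : ch = '/'
    · simp only [if_pos h1, ih]; simp
    · by_cases h2 : ch = '-'
      · simp only [if_neg h1, if_pos h2, ih]; simp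
      · simp only [if_neg h1, if_neg h2, ih]

lemma pvEmitParts_ge3 (ps : List (List Char)) : ∀ idx, 3 ≤ idx → pvEmitParts ps idx = [] := by
  induction ps with
  | nil => intro idx _; simp [pvEmitParts]
  | cons p ps ih =>
    intro idx h
    simp only [pvEmitParts, pvEmit]
    rw [if_neg (by omega), if_neg (by omega), ih (idx + 1) (by omega)]
    simp

-- main: B's functional description equals the nested-split description
lemma pvG_eq_H (l : List Char) :
    ∀ buf idx, pvG l buf idx = pvH (pvSplitC '/' l []) buf idx := by
  induction l with
  | nil => intro buf idx; simp [pvG, pvSplitC, pvH, pvEmitParts, pvJoinRest]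
  | cons ch l ih =>
    intro buf idx
    obtain ⟨t, r, htr⟩ : ∃ t r, pvSplitC '/' l [] = t :: r := by
      cases h : pvSplitC '/' l [] with
      | nil => exact absurd h (pvSplitC_ne_nil '/' l [])
      | cons t r => exact ⟨t, r, rfl⟩
    by_cases h1 : ch = '/'
    · subst h1
      have hsp : pvSplitC '/' ('/' :: l) [] = [] :: t :: r := by
        simp [pvSplitC, htr]
      have hG : pvG ('/' :: l) buf idx = pvEmit buf idx ++ '/' :: pvG l [] 0 := by
        simp [pvG]
      rw [hG, hsp, ih [] 0, htr]
      simp [pvH, pvSplitC, pvEmitParts, pvJoinRest, pvSegOut]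
    · by_cases h2 : ch = '-'
      · subst h2
        have hsp : pvSplitC '/' ('-' :: l) [] = ('-' :: t) :: r := by
          simp only [pvSplitC, if_neg h1, List.nil_append]
          rw [pvSplitC_pre '/' l ['-'], htr]; simp
        have hG : pvG ('-' :: l) buf idx = pvEmit buf idx ++ pvG l [] (idx + 1) := by
          simp [pvG]
        rw [hG, hsp, ih [] (idx + 1), htr]
        simp only [pvH]
        have hseg : pvSplitC '-' ('-' :: t) buf = buf :: pvSplitC '-' t [] := by
          simp [pvSplitC]
        rw [hseg]
        simp [pvEmitParts, List.append_assoc]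
      · have hsp : pvSplitC '/' (ch :: l) [] = (ch :: t) :: r := by
          simp only [pvSplitC, if_neg h1, List.nil_append]
          rw [pvSplitC_pre '/' l [ch], htr]; simp
        have hG : pvG (ch :: l) buf idx = pvG l (buf ++ [ch]) idx := by
          simp [pvG, h1, h2]
        rw [hG, hsp, ih (buf ++ [ch]) idx, htr]
        simp only [pvH]
        rw [show pvSplitC '-' (ch :: t) buf = pvSplitC '-' t (buf ++ [ch]) by
          simp [pvSplitC, h2]]

-- A's per-segment result equals pvSegOut
lemma pvSegA_eq (seg : List Char) : pvSegA seg = pvSegOut seg := by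
  unfold pvSegA pvSegOut
  rw [pvSplitOn_single]
  obtain ⟨p0, rest, hp⟩ : ∃ p0 rest, pvSplitC '-' seg [] = p0 :: rest := by
    cases h : pvSplitC '-' seg [] with
    | nil => exact absurd h (pvSplitC_ne_nil '-' seg [])
    | cons a b => exact ⟨a, b, rfl⟩
  rw [hp]
  have h0 : ∀ (l : List (List Char)) (d : List Char), PySem.List.pyGetD l 0 d = l.headD d := by
    intro l d
    rw [show ((0 : Int)) = ((0 : Nat) : Int) from rfl, PySem.List.pyGetD_natCast]
    cases l <;> rfl
  cases rest with
  | nil =>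
    simp [h0, pvEmitParts, pvEmit]
  | cons p1 rest' =>
    have h1 : PySem.List.pyGetD (p0 :: p1 :: rest') 1 [] = p1 := by
      rw [show ((1 : Int)) = ((1 : Nat) : Int) from rfl, PySem.List.pyGetD_natCast]; rfl
    cases rest' with
    | nil =>
      simp [h0, h1, pvEmitParts, pvEmit, List.append_assoc]
    | cons p2 rest'' =>
      have h2 : PySem.List.pyGetD (p0 :: p1 :: p2 :: rest'') 2 [] = p2 := by
        rw [show ((2 : Int)) = ((2 : Nat) : Int) from rfl, PySem.List.pyGetD_natCast]; rfl
      simp [h0, h1, h2, pvEmitParts, pvEmit, pvEmitParts_ge3, List.append_assoc]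

lemma pvFoldl_eq_map (l : List (List Char)) (init : List (List Char)) :
    l.foldl (fun acc date => acc ++ [pvSegA date]) init = init ++ l.map pvSegOut := by
  induction l generalizing init with
  | nil => simp
  | cons x xs ih => rw [List.foldl_cons, ih]; simp [pvSegA_eq, List.append_assoc]

lemma pvJoin_eq (t : List Char) (r : List (List Char)) :
    PySem.Chars.join ['/'] (pvSegOut t :: r.map pvSegOut) = pvSegOut t ++ pvJoinRest r := by
  induction r generalizing t with
  | nil => simp [PySem.Chars.join_singleton, pvJoinRest]
  | cons s r ih =>
    simp only [List.map_cons, PySem.Chars.join_cons_cons, pvJoinRest]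
    rw [ih s]
    simp

-- ===== VERDICT (by name: the statement is the Claim_ definition above) =====
theorem reform_f_date_spec : Claim_equal_reform_f_date := by
  intro ds _
  unfold Spec_reform_f_date reform_f_date reform_f_date_alt
  simp only [pvFoldl_eq_map, List.nil_append, pvFold_eq_G]
  set s := PySem.Chars.replace (PySem.Chars.replace ds.toList "-AA".toList []) ['A'] ['u'] with hs
  obtain ⟨t, r, htr⟩ : ∃ t r, pvSplitC '/' s [] = t :: r := by
    cases h : pvSplitC '/' s [] with
    | nil => exact absurd h (pvSplitC_ne_nil '/' s [])
    | cons a b => exact ⟨a, b, rfl⟩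
  rw [pvSplitOn_single, htr, pvG_eq_H s [] 0, htr]
  simp only [List.map_cons, pvJoin_eq, pvH]
  rfl
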